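-- pv_equiv track=rewrite | github.com/karen-alber11/property_sale_app | Fall 22/Machine Learning/FaceAndDigitClassification/FaceAndDigitClassification/Environmental_Variables.py | Horizontal_Skew_Direction
-- ===== SOURCE A (Python) =====
-- def Horizontal_Image_Bounds(img):
--     leftMost = 1000
--     rightMost = 0
--     j = 0
--     for line in img:
--         for char in line:
--             if(char == "#" or char == "+"):
--                 if(j > rightMost):
--                     rightMost = j
--                 if(j < leftMost):
--                     leftMost = j
--             j += 1
--         j = 0
--     return int((leftMost + rightMost) / 2)
--
-- def Horizontal_Skew_Direction(mtrx, img_no):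
--     left = 0
--     right = 0
--     middleIndex = Horizontal_Image_Bounds(mtrx[img_no])
--     i = 0
--     j = 0
--     for line in mtrx[img_no]:
--         for _ in line:
--             char = mtrx[img_no][i][j]
--             if(j <= middleIndex and (char == "#" or char == "+")):
--                 left += 1
--             elif(j > middleIndex and (char == "#" or char == "+")):
--                 right += 1
--             j += 1
--         i += 1
--         j = 0
--
--     if(abs(right - left) <= 5):
--         return -1
--     elif(right > left):
--         return 1
--     elif(left > right):
--         return 0
-- ===== SOURCE B (Python) =====
-- def Horizontal_Skew_Direction(mtrx, img_no):
--     cols = []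
--     for line in mtrx[img_no]:
--         for j, ch in enumerate(line):
--             if ch == "#" or ch == "+":
--                 cols.append(j)
--     leftMost = min([1000, *cols])
--     rightMost = max([0, *cols])
--     middle = (leftMost + rightMost) // 2
--     left = sum(1 for c in cols if c <= middle)
--     right = len(cols) - left
--     if abs(right - left) <= 5:
--         return -1
--     if right > left:
--         return 1
--     return 0
-- ===== Notes on version B (the rewrite author's own statement) =====
-- stated objective: alternative
-- what changed: B makes one pass collecting the column indices of all '#'/'+' pixels into a list, then gets the bounds with min/max (with A's 1000/0 sentinels seeded) and the left/right counts by counting indices <= middle, replacing A's two separate nested-loop passes with manual i/j counters and mtrx[img_no][i][j] re-indexing.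
import Mathlib
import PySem

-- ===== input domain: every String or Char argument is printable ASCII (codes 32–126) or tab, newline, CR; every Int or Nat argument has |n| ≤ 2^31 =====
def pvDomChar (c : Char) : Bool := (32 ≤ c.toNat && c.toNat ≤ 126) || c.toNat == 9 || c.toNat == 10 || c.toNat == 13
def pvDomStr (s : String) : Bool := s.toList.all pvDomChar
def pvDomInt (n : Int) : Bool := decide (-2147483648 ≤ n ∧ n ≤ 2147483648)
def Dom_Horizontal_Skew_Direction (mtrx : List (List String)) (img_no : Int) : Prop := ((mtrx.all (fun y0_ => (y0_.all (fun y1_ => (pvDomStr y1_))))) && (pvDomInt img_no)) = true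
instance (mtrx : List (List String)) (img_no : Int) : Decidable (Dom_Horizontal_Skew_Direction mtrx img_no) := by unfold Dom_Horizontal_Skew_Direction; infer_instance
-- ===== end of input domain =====

-- B replaces A's two full passes (bounds pass + re-indexed counting pass with manual i/j
-- counters) by one pass collecting pixel column indices, then min/max and a count on that list.

-- ===== PORT A =====
-- inner loop of Horizontal_Image_Bounds: j is the column counter, (lm, rm) the running bounds
def hibLine : List Char → Int → Int → Int → Int × Int
  | [], _, lm, rm => (lm, rm)
  | c :: rest, j, lm, rm =>
    if c = '#' ∨ c = '+' then
      hibLine rest (j + 1) (if j < lm then j else lm) (if j > rm then j else rm)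
    else hibLine rest (j + 1) lm rm

def hibOuter : List String → Int → Int → Int × Int
  | [], lm, rm => (lm, rm)
  | line :: rest, lm, rm =>
    let p := hibLine line.toList 0 lm rm
    hibOuter rest p.1 p.2

def Horizontal_Image_Bounds (img : List String) : Int :=
  let p := hibOuter img 1000 0
  -- int((leftMost + rightMost) / 2): both are ≥ 0 here, so truncated float division = floordiv (exact)
  PySem.Int.floordiv (p.1 + p.2) 2

-- inner loop of the skew pass; char = mtrx[img_no][i][j] is exactly the current char of the
-- current line (i is the line counter, j the column counter, both in range), transcribed directly
def hsdLine (middle : Int) : List Char → Int → Int → Int → Int × Int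
  | [], _, left, right => (left, right)
  | c :: rest, j, left, right =>
    if j ≤ middle ∧ (c = '#' ∨ c = '+') then hsdLine middle rest (j + 1) (left + 1) right
    else if j > middle ∧ (c = '#' ∨ c = '+') then hsdLine middle rest (j + 1) left (right + 1)
    else hsdLine middle rest (j + 1) left right

def hsdOuter (middle : Int) : List String → Int → Int → Int × Int
  | [], left, right => (left, right)
  | line :: rest, left, right =>
    let p := hsdLine middle line.toList 0 left right
    hsdOuter middle rest p.1 p.2

def Horizontal_Skew_Direction (mtrx : List (List String)) (img_no : Int) : Int :=
  match PySem.List.pyGet? mtrx img_no with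
  | none => 0  -- IndexError in Python; excluded by Pre_
  | some img =>
    let middle := Horizontal_Image_Bounds img
    let p := hsdOuter middle img 0 0
    if |p.2 - p.1| ≤ 5 then -1
    else if p.2 > p.1 then 1
    else 0  -- the remaining case is exactly left > right (left = right hits the abs branch)

-- ===== PORT B =====
-- column indices of the '#'/'+' pixels of one line, j the starting column
def colsLine : List Char → Int → List Int
  | [], _ => []
  | c :: rest, j =>
    if c = '#' ∨ c = '+' then j :: colsLine rest (j + 1) else colsLine rest (j + 1)

def colsImg (img : List String) : List Int := img.flatMap (fun s => colsLine s.toList 0)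

def Horizontal_Skew_Direction_alt (mtrx : List (List String)) (img_no : Int) : Int :=
  match PySem.List.pyGet? mtrx img_no with
  | none => 0  -- IndexError in Python; excluded by Pre_
  | some img =>
    let cols := colsImg img
    let leftMost := (PySem.List.min? (1000 :: cols) (fun y => y)).getD 0   -- min([1000, *cols]), nonempty
    let rightMost := (PySem.List.max? ((0 : Int) :: cols) (fun y => y)).getD 0  -- max([0, *cols]), nonempty
    let middle := PySem.Int.floordiv (leftMost + rightMost) 2
    let left : Int := cols.countP (fun c => c ≤ middle)
    let right : Int := (cols.length : Int) - left
    if |right - left| ≤ 5 then -1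
    else if right > left then 1
    else 0

-- ===== PRECONDITION & SPEC =====
-- Pre_: img_no must be a valid (possibly negative) index, else both Pythons raise IndexError
def Pre_Horizontal_Skew_Direction (mtrx : List (List String)) (img_no : Int) : Prop :=
  PySem.Raise.InRange mtrx.length img_no
instance (mtrx : List (List String)) (img_no : Int) : Decidable (Pre_Horizontal_Skew_Direction mtrx img_no) := by unfold Pre_Horizontal_Skew_Direction; infer_instance
def pvWitness_Horizontal_Skew_Direction : List (List String) × Int := ([["#.", ".+"]], 0)

def Spec_Horizontal_Skew_Direction (mtrx : List (List String)) (img_no : Int) (out : Int) : Prop := out = Horizontal_Skew_Direction_alt mtrx img_no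
instance (mtrx : List (List String)) (img_no : Int) (out : Int) : Decidable (Spec_Horizontal_Skew_Direction mtrx img_no out) := by unfold Spec_Horizontal_Skew_Direction; infer_instance

-- ===== CLAIM (what is proved, stated in full; the proofs are below) =====
def Claim_equal_Horizontal_Skew_Direction : Prop := ∀ (mtrx : List (List String)) (img_no : Int), Dom_Horizontal_Skew_Direction mtrx img_no → Pre_Horizontal_Skew_Direction mtrx img_no → Spec_Horizontal_Skew_Direction mtrx img_no (Horizontal_Skew_Direction mtrx img_no)

-- ===== LEMMAS AND PROOFS =====

theorem hibLine_eq (cs : List Char) (j lm rm : Int) :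
    hibLine cs j lm rm = ((colsLine cs j).foldl min lm, (colsLine cs j).foldl max rm) := by
  induction cs generalizing j lm rm with
  | nil => simp [hibLine, colsLine]
  | cons c rest ih =>
    by_cases hc : c = '#' ∨ c = '+'
    · have hcons : colsLine (c :: rest) j = j :: colsLine rest (j + 1) := by
        simp [colsLine, hc]
      have hstep : hibLine (c :: rest) j lm rm
          = hibLine rest (j + 1) (if j < lm then j else lm) (if j > rm then j else rm) := by
        simp [hibLine, hc]
      have hmin : (if j < lm then j else lm) = min lm j := by
        rw [min_def]; split_ifs <;> omega
      have hmax : (if j > rm then j else rm) = max rm j := by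
        rw [max_def]; split_ifs <;> omega
      rw [hstep, ih, hcons]
      simp only [List.foldl_cons, hmin, hmax]
    · have hstep : hibLine (c :: rest) j lm rm = hibLine rest (j + 1) lm rm := by
        simp [hibLine, hc]
      have hcons : colsLine (c :: rest) j = colsLine rest (j + 1) := by
        simp [colsLine, hc]
      rw [hstep, ih, hcons]

theorem hibOuter_eq (lines : List String) (lm rm : Int) :
    hibOuter lines lm rm = ((colsImg lines).foldl min lm, (colsImg lines).foldl max rm) := by
  induction lines generalizing lm rm with
  | nil => simp [hibOuter, colsImg]
  | cons line rest ih =>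
    simp only [hibOuter, hibLine_eq, ih, colsImg, List.flatMap_cons, List.foldl_append]

theorem hsdLine_eq (middle : Int) (cs : List Char) (j left right : Int) :
    hsdLine middle cs j left right =
      (left + ((colsLine cs j).countP (fun c => c ≤ middle) : Int),
       right + ((colsLine cs j).countP (fun c => ¬ (c ≤ middle)) : Int)) := by
  induction cs generalizing j left right with
  | nil => simp [hsdLine, colsLine]
  | cons c rest ih =>
    by_cases hc : c = '#' ∨ c = '+'
    · have hcons : colsLine (c :: rest) j = j :: colsLine rest (j + 1) := by
        simp [colsLine, hc]
      by_cases hj : j ≤ middle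
      · have hstep : hsdLine middle (c :: rest) j left right
            = hsdLine middle rest (j + 1) (left + 1) right := by
          simp [hsdLine, hc, hj]
        rw [hstep, ih, hcons]
        refine Prod.ext ?_ ?_ <;> simp [List.countP_cons, hj] <;> push_cast <;> try ring
      · have hj' : middle < j := by omega
        have hstep : hsdLine middle (c :: rest) j left right
            = hsdLine middle rest (j + 1) left (right + 1) := by
          simp [hsdLine, hc, hj, hj']
        rw [hstep, ih, hcons]
        refine Prod.ext ?_ ?_ <;> simp [List.countP_cons, hj, hj'] <;> push_cast <;> try omega
    · have hstep : hsdLine middle (c :: rest) j left right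
          = hsdLine middle rest (j + 1) left right := by
        simp [hsdLine, hc]
      have hcons : colsLine (c :: rest) j = colsLine rest (j + 1) := by
        simp [colsLine, hc]
      rw [hstep, ih, hcons]

theorem hsdOuter_eq (middle : Int) (lines : List String) (left right : Int) :
    hsdOuter middle lines left right =
      (left + ((colsImg lines).countP (fun c => c ≤ middle) : Int),
       right + ((colsImg lines).countP (fun c => ¬ (c ≤ middle)) : Int)) := by
  induction lines generalizing left right with
  | nil => simp [hsdOuter, colsImg]
  | cons line rest ih =>
    simp only [hsdOuter, hsdLine_eq, ih, colsImg, List.flatMap_cons, List.countP_append]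
    refine Prod.ext ?_ ?_ <;> simp <;> push_cast <;> ring

theorem countP_le_add (M : Int) (l : List Int) :
    l.countP (fun c => c ≤ M) + l.countP (fun c => ¬ (c ≤ M)) = l.length := by
  induction l with
  | nil => simp
  | cons x t ih =>
    simp only [List.countP_cons, List.length_cons]
    by_cases h : x ≤ M
    · rw [if_pos (by simp [h]), if_neg (by simp [h])]
      omega
    · rw [if_neg (by simp [h]), if_pos (by simp [h])]
      omega

-- ===== VERDICT (by name: the statement is the Claim_ definition above) =====
theorem Horizontal_Skew_Direction_spec : Claim_equal_Horizontal_Skew_Direction := by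
  intro mtrx img_no _ hpre
  unfold Spec_Horizontal_Skew_Direction Horizontal_Skew_Direction Horizontal_Skew_Direction_alt
  cases hg : PySem.List.pyGet? mtrx img_no with
  | none => rfl
  | some img =>
    simp only [Horizontal_Image_Bounds, hibOuter_eq, hsdOuter_eq,
      PySem.List.min?_id_cons, PySem.List.max?_id_cons, Option.getD_some, zero_add]
    have h := countP_le_add (PySem.Int.floordiv
      (List.foldl min 1000 (colsImg img) + List.foldl max 0 (colsImg img)) 2) (colsImg img)
    have hcast : (((colsImg img).countP (fun c => ¬ (c ≤ PySem.Int.floordiv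
        (List.foldl min 1000 (colsImg img) + List.foldl max 0 (colsImg img)) 2))) : Int)
        = ((colsImg img).length : Int) - (((colsImg img).countP (fun c => c ≤ PySem.Int.floordiv
        (List.foldl min 1000 (colsImg img) + List.foldl max 0 (colsImg img)) 2)) : Int) := by
      omega
    rw [hcast]
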